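-- pv_equiv track=rewrite | github.com/santoshpalla27/devops-app | tester-service/assertions/event_assertions.py | assert_no_duplicate_events
-- ===== SOURCE A (Python) =====
-- from typing import List, Dict
--
-- def assert_no_duplicate_events(
--
--     events: List[Dict],
--     event_type: str
-- ) -> tuple[bool, str]:
--     """Verify no duplicate events (based on eventId)."""
--     event_ids = [
--         e.get('eventId')
--         for e in events
--         if e.get('event Type') == event_type and 'eventId' in e
--     ]
--
--     if len(event_ids) == len(set(event_ids)):
--         return True, f"✅ No duplicate '{event_type}' events"
--
--     return False, f"❌ Found duplicate '{event_type}' events"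
-- ===== SOURCE B (Python) =====
-- def assert_no_duplicate_events(events, event_type):
--     """Verify no duplicate events (based on eventId) — single pass with early exit."""
--     seen = set()
--     for e in events:
--         if e.get('event Type') == event_type and 'eventId' in e:
--             eid = e.get('eventId')
--             if eid in seen:
--                 return False, f"❌ Found duplicate '{event_type}' events"
--             seen.add(eid)
--     return True, f"✅ No duplicate '{event_type}' events"
-- ===== Notes on version B (the rewrite author's own statement) =====
-- stated objective: alternative
-- what changed: B replaces A's build-the-whole-filtered-id-list-then-compare-its-length-with-its-set's approach by a single pass over events maintaining a seen set, returning the duplicate verdict the instant an eventId repeats.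
import Mathlib
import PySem

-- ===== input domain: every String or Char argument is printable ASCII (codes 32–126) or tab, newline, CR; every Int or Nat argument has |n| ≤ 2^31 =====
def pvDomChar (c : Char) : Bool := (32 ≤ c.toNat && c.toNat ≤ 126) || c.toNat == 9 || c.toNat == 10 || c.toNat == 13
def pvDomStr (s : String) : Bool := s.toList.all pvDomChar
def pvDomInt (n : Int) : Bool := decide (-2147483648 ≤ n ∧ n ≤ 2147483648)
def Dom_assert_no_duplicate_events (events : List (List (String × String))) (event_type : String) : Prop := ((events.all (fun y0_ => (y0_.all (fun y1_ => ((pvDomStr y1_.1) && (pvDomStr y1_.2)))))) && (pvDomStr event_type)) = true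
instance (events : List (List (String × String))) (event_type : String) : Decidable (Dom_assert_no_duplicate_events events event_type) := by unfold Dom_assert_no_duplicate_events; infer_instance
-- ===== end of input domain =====

-- B is a single pass with a `seen` set and early exit, instead of A's full filtered
-- id list compared with its set by length; same return value everywhere (objective: alternative).

-- ===== PORT A =====
def assert_no_duplicate_events (events : List (List (String × String))) (event_type : String) : Bool × String :=
  let event_ids :=
    (events.filter (fun e =>
        PySem.Dict.get? (PySem.Dict.mk e) "event Type" == some event_type && PySem.Dict.contains (PySem.Dict.mk e) "eventId")).map
      (fun e => PySem.Dict.get? (PySem.Dict.mk e) "eventId")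
  if event_ids.length = (PySem.Set.ofList event_ids).length then
    (true, "✅ No duplicate '" ++ event_type ++ "' events")
  else
    (false, "❌ Found duplicate '" ++ event_type ++ "' events")

-- ===== PORT B =====
-- the 'for e in events' loop of Source B, carrying the `seen` set
def pvNoDupLoop (events : List (List (String × String))) (event_type : String)
    (seen : PySem.Set (Option String)) : Bool × String :=
  match events with
  | [] => (true, "✅ No duplicate '" ++ event_type ++ "' events")
  | e :: rest =>
    if PySem.Dict.get? (PySem.Dict.mk e) "event Type" == some event_type && PySem.Dict.contains (PySem.Dict.mk e) "eventId" then
      let eid := PySem.Dict.get? (PySem.Dict.mk e) "eventId"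
      if PySem.Set.contains seen eid then
        (false, "❌ Found duplicate '" ++ event_type ++ "' events")
      else
        pvNoDupLoop rest event_type (PySem.Set.add seen eid)
    else
      pvNoDupLoop rest event_type seen

def assert_no_duplicate_events_alt (events : List (List (String × String))) (event_type : String) : Bool × String :=
  pvNoDupLoop events event_type PySem.Set.empty

-- ===== PRECONDITION & SPEC =====
def Spec_assert_no_duplicate_events (events : List (List (String × String))) (event_type : String) (out : Bool × String) : Prop := out = assert_no_duplicate_events_alt events event_type
instance (events : List (List (String × String))) (event_type : String) (out : Bool × String) : Decidable (Spec_assert_no_duplicate_events events event_type out) := by unfold Spec_assert_no_duplicate_events; infer_instance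

-- ===== CLAIM (what is proved, stated in full; the proofs are below) =====
def Claim_equal_assert_no_duplicate_events : Prop := ∀ (events : List (List (String × String))) (event_type : String), Dom_assert_no_duplicate_events events event_type → Spec_assert_no_duplicate_events events event_type (assert_no_duplicate_events events event_type)

-- ===== LEMMAS AND PROOFS =====

-- the filter predicate and filtered id list both programs are about
def pvPred (event_type : String) (e : List (String × String)) : Bool :=
  PySem.Dict.get? (PySem.Dict.mk e) "event Type" == some event_type && PySem.Dict.contains (PySem.Dict.mk e) "eventId"

def pvIds (events : List (List (String × String))) (event_type : String) : List (Option String) :=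
  (events.filter (pvPred event_type)).map (fun e => PySem.Dict.get? (PySem.Dict.mk e) "eventId")

theorem pvOfList_sublist (xs : List (Option String)) :
    List.Sublist (PySem.Set.ofList xs) xs := by
  induction xs with
  | nil => simp [PySem.Set.ofList]
  | cons x xs ih =>
    rw [PySem.Set.ofList_cons]
    refine List.cons_sublist_cons.mpr ?_
    exact List.Sublist.trans (by simp [PySem.Set.discard]) ih

theorem pvOfList_length_eq_iff_nodup (xs : List (Option String)) :
    (PySem.Set.ofList xs).length = xs.length ↔ xs.Nodup := by
  constructor
  · intro h
    have hnd := PySem.Set.nodup_ofList xs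
    rwa [(pvOfList_sublist xs).eq_of_length h] at hnd
  · intro h; rw [PySem.Set.ofList_eq_self_of_nodup xs h]

theorem pvLoop_char (event_type : String) (events : List (List (String × String)))
    (seen : PySem.Set (Option String)) :
    pvNoDupLoop events event_type seen =
      if (pvIds events event_type).Nodup ∧ ∀ x ∈ pvIds events event_type, x ∉ seen then
        (true, "✅ No duplicate '" ++ event_type ++ "' events")
      else
        (false, "❌ Found duplicate '" ++ event_type ++ "' events") := by
  induction events generalizing seen with
  | nil => simp [pvNoDupLoop, pvIds]
  | cons e rest ih =>
    by_cases hp : pvPred event_type e = true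
    · have hids : pvIds (e :: rest) event_type =
          PySem.Dict.get? (PySem.Dict.mk e) "eventId" :: pvIds rest event_type := by
        rw [pvIds, List.filter_cons, if_pos hp]; rfl
      have hstep : pvNoDupLoop (e :: rest) event_type seen =
          (if PySem.Set.contains seen (PySem.Dict.get? (PySem.Dict.mk e) "eventId") then
            (false, "❌ Found duplicate '" ++ event_type ++ "' events")
          else
            pvNoDupLoop rest event_type (PySem.Set.add seen (PySem.Dict.get? (PySem.Dict.mk e) "eventId"))) := by
        rw [pvNoDupLoop, if_pos (by exact hp)]
      by_cases hm : PySem.Dict.get? (PySem.Dict.mk e) "eventId" ∈ seen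
      · have hc : PySem.Set.contains seen (PySem.Dict.get? (PySem.Dict.mk e) "eventId") = true :=
          (PySem.Set.contains_iff _ _).mpr hm
        rw [hstep, if_pos hc, if_neg]
        rintro ⟨-, hout⟩
        exact hout _ (hids ▸ List.mem_cons_self) hm
      · have hc : PySem.Set.contains seen (PySem.Dict.get? (PySem.Dict.mk e) "eventId") = false := by
          by_contra h
          exact hm ((PySem.Set.contains_iff _ _).mp (by simpa using h))
        rw [hstep,
          if_neg (fun hcontra => hm ((PySem.Set.contains_iff _ _).mp hcontra)), ih]
        have hmem : ∀ x, x ∈ PySem.Set.add seen (PySem.Dict.get? (PySem.Dict.mk e) "eventId") ↔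
            x ∈ seen ∨ x = PySem.Dict.get? (PySem.Dict.mk e) "eventId" :=
          fun x => PySem.Set.mem_add _ _ _
        by_cases hcond : (pvIds (e :: rest) event_type).Nodup ∧
            ∀ x ∈ pvIds (e :: rest) event_type, x ∉ seen
        · rw [if_pos, if_pos hcond]
          rcases hcond with ⟨hnd, hout⟩
          rw [hids] at hnd hout
          refine ⟨(List.nodup_cons.mp hnd).2, fun x hx => ?_⟩
          rw [hmem]
          rintro (h1 | h2)
          · exact hout x (List.mem_cons_of_mem _ hx) h1
          · exact (List.nodup_cons.mp hnd).1 (h2 ▸ hx)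
        · rw [if_neg, if_neg hcond]
          intro ⟨hnd, hout⟩
          apply hcond
          rw [hids]
          constructor
          · exact List.nodup_cons.mpr ⟨fun h => (hout _ h ((hmem _).mpr (Or.inr rfl))), hnd⟩
          · rintro x hx hxs
            rcases List.mem_cons.mp hx with rfl | hx'
            · exact hm hxs
            · exact hout x hx' ((hmem _).mpr (Or.inl hxs))
    · have hids : pvIds (e :: rest) event_type = pvIds rest event_type := by
        rw [pvIds, List.filter_cons, if_neg hp]; rfl
      rw [show pvNoDupLoop (e :: rest) event_type seen = pvNoDupLoop rest event_type seen by
        rw [pvNoDupLoop, if_neg (by exact hp)], ih, hids]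

-- ===== VERDICT (by name: the statement is the Claim_ definition above) =====
theorem assert_no_duplicate_events_spec : Claim_equal_assert_no_duplicate_events := by
  intro events event_type _
  unfold Spec_assert_no_duplicate_events assert_no_duplicate_events_alt
  have hA : assert_no_duplicate_events events event_type =
      if (pvIds events event_type).length = (PySem.Set.ofList (pvIds events event_type)).length then
        (true, "✅ No duplicate '" ++ event_type ++ "' events")
      else
        (false, "❌ Found duplicate '" ++ event_type ++ "' events") := rfl
  rw [hA, pvLoop_char]
  simp only [PySem.Set.empty, List.not_mem_nil, not_false_iff, implies_true, and_true]
  rcases eq_or_ne (PySem.Set.ofList (pvIds events event_type)).length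
      (pvIds events event_type).length with h | h
  · rw [if_pos ((pvOfList_length_eq_iff_nodup _).mp h), if_pos h.symm]
  · rw [if_neg (fun hn => h ((pvOfList_length_eq_iff_nodup _).mpr hn)),
      if_neg (fun he => h he.symm)]
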